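-- pv_equiv track=rewrite | github.com/ischi09/Distributed-Systems-Lab- | setml/tasks.py | build_m_tuples
-- ===== SOURCE A (Python) =====
-- from typing import Any, Callable, List, Sequence, Tuple
--
-- class IndexTuple:
--     __slots__ = ["indices", "values"]
--     indices: Tuple[int, ...]
--     values: Tuple[Any, ...]
--
--     def __init__(self, indices: Sequence[int], values: Sequence[Any]) -> None:
--         self.indices = tuple(indices)
--         self.values = tuple(values)
--
--     def is_valid(self) -> bool:
--         """Return true no indices are duplicate."""
--         return len(set(self.indices)) == len(self.indices)
--
--     def would_be_valid(self, index: int) -> bool: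
--         """Return true if IndexTuple would be valid if element at index were appended."""
--         return index not in self.indices
--
--     def append(self, index: int, value: Any) -> None:
--         self.indices += (index,)
--         self.values += (value,)
--
--     def to_tuple(self) -> Tuple[Any, ...]:
--         return self.values
--
--     def to_list(self) -> List[Any]:
--         return list(self.values)
--
-- def build_m_tuples(values: List[Any], m: int) -> List[Tuple[Any, ...]]:
--     if m < 1 or len(values) < m:
--         return []
--
--     # Initialize with singletons.
--     cur_index_tuples = [
--         IndexTuple(indices=[i], values=[v_i]) for i, v_i in enumerate(values)
--     ]
--     prev_index_tuples = cur_index_tuples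
--
--     for _ in range(m - 1):
--         cur_index_tuples = []
--         for index_tuple in prev_index_tuples:
--             for i, v_i in enumerate(values):
--                 if index_tuple.would_be_valid(index=i):
--                     cur_index_tuples.append(
--                         IndexTuple(
--                             indices=index_tuple.indices + (i,),
--                             values=index_tuple.values + (v_i,),
--                         )
--                     )
--
--         prev_index_tuples = cur_index_tuples
--
--     return [index_tuple.to_tuple() for index_tuple in cur_index_tuples]
-- ===== SOURCE B (Python) =====
-- def build_m_tuples(values, m):
--     if m < 1 or len(values) < m:
--         return []
--     results = []
--
--     def backtrack(used, partial):
--         if len(partial) == m: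
--             results.append(tuple(partial))
--             return
--         for i, v in enumerate(values):
--             if i not in used:
--                 used.append(i)
--                 partial.append(v)
--                 backtrack(used, partial)
--                 used.pop()
--                 partial.pop()
--
--     backtrack([], [])
--     return results
-- ===== Notes on version B (the rewrite author's own statement) =====
-- stated objective: alternative
-- what changed: Replaces A's level-by-level frontier of IndexTuple objects (rebuilt m-1 times with quadratic tuple copying) by depth-first recursive backtracking over the call stack that emits each completed tuple directly, in the same lexicographic index order.
import Mathlib
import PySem

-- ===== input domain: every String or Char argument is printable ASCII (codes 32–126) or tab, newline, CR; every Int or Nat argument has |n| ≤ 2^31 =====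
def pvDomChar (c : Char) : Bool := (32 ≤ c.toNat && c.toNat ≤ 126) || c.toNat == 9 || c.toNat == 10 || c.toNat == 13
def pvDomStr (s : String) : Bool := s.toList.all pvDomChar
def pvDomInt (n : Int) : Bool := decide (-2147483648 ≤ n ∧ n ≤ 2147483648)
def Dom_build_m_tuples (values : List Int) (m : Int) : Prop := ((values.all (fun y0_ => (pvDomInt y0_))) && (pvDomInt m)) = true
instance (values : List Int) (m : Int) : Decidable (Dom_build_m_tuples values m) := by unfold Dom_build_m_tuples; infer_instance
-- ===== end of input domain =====

-- B replaces A's level-by-level frontier of index tuples (rebuilt m-1 times) by depth-first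
-- recursive backtracking emitting each completed tuple directly, in the same order (alternative).

-- ===== PORT A =====
-- A's IndexTuple is ported as a pair (indices, values); A's BFS loop over range(m-1)
-- rebuilds the frontier list with nested appends, exactly as the Python does.
def build_m_tuples (values : List Int) (m : Int) : List (List Int) :=
  if m < 1 ∨ (values.length : Int) < m then []
  else
    let init := (PySem.List.enumerate values).map (fun iv => ([iv.1], [iv.2]))
    let cur := (List.range (m - 1).toNat).foldl
      (fun prev _ =>
        prev.foldl (fun cur t =>
          (PySem.List.enumerate values).foldl (fun cur iv =>
            if iv.1 ∉ t.1 then cur ++ [(t.1 ++ [iv.1], t.2 ++ [iv.2])] else cur) cur) [])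
      init
    cur.map (·.2)

-- ===== PORT B =====
-- B's recursive backtracking helper: `k` is the remaining depth (m - len(partial));
-- the Python's shared `results` list / mutation discipline becomes collecting the
-- recursive results of each enumerate step in order.
def bGo (values : List Int) (used : List Int) (partialV : List Int) : Nat → List (List Int)
  | 0 => [partialV]
  | k+1 => (PySem.List.enumerate values).flatMap (fun iv =>
      if iv.1 ∈ used then [] else bGo values (used ++ [iv.1]) (partialV ++ [iv.2]) k)

def build_m_tuples_alt (values : List Int) (m : Int) : List (List Int) :=
  if m < 1 ∨ (values.length : Int) < m then []
  else bGo values [] [] m.toNat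

-- ===== PRECONDITION & SPEC =====
def Spec_build_m_tuples (values : List Int) (m : Int) (out : List (List Int)) : Prop := out = build_m_tuples_alt values m
instance (values : List Int) (m : Int) (out : List (List Int)) : Decidable (Spec_build_m_tuples values m out) := by unfold Spec_build_m_tuples; infer_instance

-- ===== CLAIM (what is proved, stated in full; the proofs are below) =====
def Claim_equal_build_m_tuples : Prop := ∀ (values : List Int) (m : Int), Dom_build_m_tuples values m → Spec_build_m_tuples values m (build_m_tuples values m)

-- ===== LEMMAS AND PROOFS =====

-- One expansion of a single tuple, as a flatMap.
def stepF (values : List Int) (t : List Int × List Int) : List (List Int × List Int) :=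
  (PySem.List.enumerate values).flatMap (fun iv =>
    if iv.1 ∈ t.1 then [] else [(t.1 ++ [iv.1], t.2 ++ [iv.2])])

-- A's inner enumerate-fold appends exactly stepF's elements.
theorem innerF (t : List Int × List Int) :
    ∀ (l : List (Int × Int)) (cur : List (List Int × List Int)),
      l.foldl (fun cur iv =>
        if iv.1 ∉ t.1 then cur ++ [(t.1 ++ [iv.1], t.2 ++ [iv.2])] else cur) cur
      = cur ++ l.flatMap (fun iv =>
          if iv.1 ∈ t.1 then [] else [(t.1 ++ [iv.1], t.2 ++ [iv.2])]) := by
  intro l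
  induction l with
  | nil => simp
  | cons iv l ih =>
      intro cur
      rw [List.foldl_cons]
      by_cases h : iv.1 ∈ t.1
      · rw [if_neg (by simpa using h), ih]
        simp [h]
      · rw [if_pos h, ih]
        simp [h, List.append_assoc]

-- A's frontier-rebuilding pass equals flatMap of stepF.
theorem outerF (values : List Int) :
    ∀ (prev acc : List (List Int × List Int)),
      prev.foldl (fun cur t =>
        (PySem.List.enumerate values).foldl (fun cur iv =>
          if iv.1 ∉ t.1 then cur ++ [(t.1 ++ [iv.1], t.2 ++ [iv.2])] else cur) cur) acc
      = acc ++ prev.flatMap (stepF values) := by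
  intro prev
  induction prev with
  | nil => simp
  | cons t prev ih =>
      intro acc
      rw [List.foldl_cons, innerF, ih]
      simp [stepF, List.append_assoc]

-- foldl over range with a constant-in-index body is function iteration.
theorem foldl_range_iterate {α : Type} (F : α → α) :
    ∀ (k : Nat) (s : α), (List.range k).foldl (fun s _ => F s) s = F^[k] s := by
  intro k
  induction k with
  | zero => intro s; simp
  | succ k ih =>
      intro s
      rw [List.range_succ_eq_map]
      simp only [List.foldl_cons, List.foldl_map]
      rw [ih, Function.iterate_succ_apply]

-- Core: k BFS expansions of a frontier, projected to values, equal DFS with fuel k from each tuple.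
theorem bfs_eq_dfs (values : List Int) :
    ∀ (k : Nat) (ts : List (List Int × List Int)),
      (((fun l => l.flatMap (stepF values))^[k]) ts).map (·.2)
      = ts.flatMap (fun t => bGo values t.1 t.2 k) := by
  intro k
  induction k with
  | zero =>
      intro ts
      simp [bGo, Eq.symm List.map_eq_flatMap]
  | succ k ih =>
      intro ts
      rw [Function.iterate_succ_apply, ih, List.flatMap_assoc]
      congr 1
      funext t
      rw [stepF, List.flatMap_assoc, bGo]
      congr 1
      funext iv
      by_cases h : iv.1 ∈ t.1 <;> simp [h]

-- ===== VERDICT (by name: the statement is the Claim_ definition above) =====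
theorem build_m_tuples_spec : Claim_equal_build_m_tuples := by
  intro values m _
  unfold Spec_build_m_tuples build_m_tuples build_m_tuples_alt
  by_cases hg : m < 1 ∨ (values.length : Int) < m
  · simp [hg]
  · rw [if_neg hg, if_neg hg]
    have hm : m.toNat = (m - 1).toNat + 1 := by
      rcases not_or.mp hg with ⟨h1, _⟩; omega
    have hfun : (fun (prev : List (List Int × List Int)) (_ : Nat) =>
          prev.foldl (fun cur t => (PySem.List.enumerate values).foldl (fun cur iv =>
            if iv.1 ∉ t.1 then cur ++ [(t.1 ++ [iv.1], t.2 ++ [iv.2])] else cur) cur) [])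
        = fun prev _ => prev.flatMap (stepF values) := by
      funext prev _
      rw [outerF]
      simp
    simp only [hfun, foldl_range_iterate, bfs_eq_dfs, List.flatMap_map, hm, bGo]
    simp
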